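-- pv_equiv track=rewrite | github.com/RadouanFARAH/chatbot | actions/actions.py | clean_montant
-- ===== SOURCE A (Python) =====
-- def clean_montant(name):
--     num=['1','2','3','4','5','6','7','8','9','0']
--     res=""
--     flag=False
--     cc=0
--     for x in name:
--         if(x in num and flag==False):
--             res=res+x
--         if(x in num and flag==True and cc<2):
--             res=res+x
--             cc=cc+1
--         if((x=='.' or x==',') and flag==False):
--             res=res+'.'
--             flag=True
--     return res
-- ===== SOURCE B (Python) =====
-- def clean_montant(name):
--     digits = '0123456789'
--     idx = next((i for i, ch in enumerate(name) if ch in '.,'), None)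
--     if idx is None:
--         return ''.join(c for c in name if c in digits)
--     intpart = ''.join(c for c in name[:idx] if c in digits)
--     decpart = ''.join(c for c in name[idx + 1:] if c in digits)[:2]
--     return intpart + '.' + decpart
-- ===== Notes on version B (the rewrite author's own statement) =====
-- stated objective: simpler
-- what changed: Replaces A's one-pass flag/counter state machine with a locate-first-separator-then-filter-two-slices decomposition: digits before the first separator form the integer part, the first two digits after it the decimal part.
import Mathlib
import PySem

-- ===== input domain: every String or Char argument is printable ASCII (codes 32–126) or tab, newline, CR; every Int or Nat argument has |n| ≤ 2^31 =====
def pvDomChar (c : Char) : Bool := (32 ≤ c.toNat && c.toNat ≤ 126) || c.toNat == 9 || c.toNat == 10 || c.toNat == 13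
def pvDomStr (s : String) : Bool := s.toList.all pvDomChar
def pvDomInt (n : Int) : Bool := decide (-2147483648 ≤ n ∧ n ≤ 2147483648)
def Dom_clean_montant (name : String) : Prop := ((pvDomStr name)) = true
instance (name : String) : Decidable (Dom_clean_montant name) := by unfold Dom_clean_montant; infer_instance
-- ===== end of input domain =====

-- B replaces A's one-pass flag/counter state machine by a locate-the-first-separator-then-filter-two-slices decomposition (objective: simpler).

-- ===== PORT A =====
-- A's digit list ['1'..'9','0']; membership test 'x in num'
def cmNum : List Char := ['1','2','3','4','5','6','7','8','9','0']

-- the for-loop of A, step for step; res kept as List Char (res=res+x ↦ res ++ [x]),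
-- String.ofList applied once at the end
def cmLoop : List Char → List Char → Bool → Int → List Char
  | [], res, _, _ => res
  | x :: xs, res, flag, cc =>
    let res := if x ∈ cmNum ∧ flag = false then res ++ [x] else res
    let p := if x ∈ cmNum ∧ flag = true ∧ cc < 2 then (res ++ [x], cc + 1) else (res, cc)
    let q := if (x = '.' ∨ x = ',') ∧ flag = false then (p.1 ++ ['.'], true) else (p.1, flag)
    cmLoop xs q.1 q.2 p.2

def clean_montant (name : String) : String := String.ofList (cmLoop name.toList [] false 0)

-- ===== PORT B =====
def cmIsDig (c : Char) : Bool := c ∈ ['0','1','2','3','4','5','6','7','8','9']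

def cmIsSep (c : Char) : Bool := c = '.' ∨ c = ','

-- Source B on the character list: first separator index (the enumerate/next scan ↦ findIdx?);
-- slices name[:idx], name[idx+1:] with nonnegative idx are exactly take/drop
def cmAlt (l : List Char) : List Char :=
  match l.findIdx? cmIsSep with
  | none => l.filter cmIsDig
  | some i => (l.take i).filter cmIsDig ++ '.' :: ((l.drop (i + 1)).filter cmIsDig).take 2

def clean_montant_alt (name : String) : String := String.ofList (cmAlt name.toList)

-- ===== PRECONDITION & SPEC =====
def Spec_clean_montant (name : String) (out : String) : Prop := out = clean_montant_alt name
instance (name : String) (out : String) : Decidable (Spec_clean_montant name out) := by unfold Spec_clean_montant; infer_instance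

-- ===== CLAIM (what is proved, stated in full; the proofs are below) =====
def Claim_equal_clean_montant : Prop := ∀ (name : String), Dom_clean_montant name → Spec_clean_montant name (clean_montant name)

-- ===== LEMMAS AND PROOFS =====

theorem cmMem_iff (x : Char) : (x ∈ cmNum) ↔ cmIsDig x = true := by
  simp [cmNum, cmIsDig]; tauto

theorem cmDig_not_sep {x : Char} (h : x ∈ cmNum) : cmIsSep x = false := by
  fin_cases h <;> decide

-- after the separator: A collects exactly the first (2 - cc)⁺ remaining digits
theorem cmLoop_true (l : List Char) : ∀ (res : List Char) (cc : Int),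
    cmLoop l res true cc = res ++ (l.filter cmIsDig).take (2 - cc).toNat := by
  induction l with
  | nil => simp [cmLoop]
  | cons x xs ih =>
    intro res cc
    by_cases hd : x ∈ cmNum
    · have hdig : cmIsDig x = true := (cmMem_iff x).1 hd
      by_cases hcc : cc < 2
      · have h1 : (2 - cc).toNat = (2 - (cc + 1)).toNat + 1 := by omega
        simp [cmLoop, hd, hcc, ih, hdig, h1]
      · have h0 : (2 - cc).toNat = 0 := by omega
        simp [cmLoop, hd, hcc, ih, hdig, h0]
    · have hdig : cmIsDig x = false := by
        by_contra h; exact hd ((cmMem_iff x).2 (by simpa using h))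
      simp [cmLoop, hd, ih, hdig]

-- before any separator: A's loop from (flag=false, cc=0) computes B's decomposition
theorem cmLoop_false (l : List Char) : ∀ (res : List Char),
    cmLoop l res false 0 = res ++ cmAlt l := by
  induction l with
  | nil => intro res; simp [cmLoop, cmAlt]
  | cons x xs ih =>
    intro res
    by_cases hs : cmIsSep x = true
    · have hor : x = '.' ∨ x = ',' := by simpa [cmIsSep] using hs
      have hd : x ∉ cmNum := by
        intro h; rw [cmDig_not_sep h] at hs; exact Bool.false_ne_true hs
      simp only [cmLoop, hd, false_and, if_false, and_false, Bool.false_eq_true]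
      rw [if_pos (by simpa using hor)]
      rw [cmLoop_true]
      simp [cmAlt, List.findIdx?_cons, hs]
    · have hs' : cmIsSep x = false := by simpa using hs
      have hnor : ¬(x = '.' ∨ x = ',') := by simpa [cmIsSep] using hs'
      by_cases hd : x ∈ cmNum
      · have hdig : cmIsDig x = true := (cmMem_iff x).1 hd
        simp only [cmLoop, hd, if_true, and_false, true_and, Bool.false_eq_true, false_and,
          if_false]
        rw [if_neg (by simp [hnor])]
        rw [ih]
        simp [cmAlt, List.findIdx?_cons, hs', hdig]
        cases h : xs.findIdx? cmIsSep <;> simp [h, List.filter_cons, hdig]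
      · have hdig : cmIsDig x = false := by
          by_contra h; exact hd ((cmMem_iff x).2 (by simpa using h))
        simp only [cmLoop, hd, false_and, if_false, and_false]
        rw [if_neg (by simp [hnor])]
        rw [ih]
        simp [cmAlt, List.findIdx?_cons, hs', hdig]
        cases h : xs.findIdx? cmIsSep <;> simp [h, List.filter_cons, hdig]

-- ===== VERDICT (by name: the statement is the Claim_ definition above) =====
theorem clean_montant_spec : Claim_equal_clean_montant := by
  intro name _
  unfold Spec_clean_montant clean_montant clean_montant_alt
  rw [cmLoop_false]
  simp
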